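-- pv_equiv track=rewrite | github.com/adam-binks/write-reason | analysis/graph_ordering.py | get_shallowest
-- ===== SOURCE A (Python) =====
-- def get_shallowest(roots):
--     shallowest = 0
--     nodes = []
--     for node, rel_depth in roots:
--         if rel_depth == shallowest:
--             nodes.append(node)
--         elif rel_depth < shallowest:
--             shallowest = rel_depth
--             nodes = [node]
--
--     return nodes, shallowest
-- ===== SOURCE B (Python) =====
-- def get_shallowest(roots):
--     items = list(roots)
--     shallowest = min([0] + [rel_depth for _, rel_depth in items])
--     nodes = [node for node, rel_depth in items if rel_depth == shallowest]
--     return nodes, shallowest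
-- ===== Notes on version B (the rewrite author's own statement) =====
-- stated objective: simpler
-- what changed: A's single running-min-with-reset pass is replaced by a two-pass compute-min (with the 0 baseline) then filter structure.
import Mathlib
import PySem

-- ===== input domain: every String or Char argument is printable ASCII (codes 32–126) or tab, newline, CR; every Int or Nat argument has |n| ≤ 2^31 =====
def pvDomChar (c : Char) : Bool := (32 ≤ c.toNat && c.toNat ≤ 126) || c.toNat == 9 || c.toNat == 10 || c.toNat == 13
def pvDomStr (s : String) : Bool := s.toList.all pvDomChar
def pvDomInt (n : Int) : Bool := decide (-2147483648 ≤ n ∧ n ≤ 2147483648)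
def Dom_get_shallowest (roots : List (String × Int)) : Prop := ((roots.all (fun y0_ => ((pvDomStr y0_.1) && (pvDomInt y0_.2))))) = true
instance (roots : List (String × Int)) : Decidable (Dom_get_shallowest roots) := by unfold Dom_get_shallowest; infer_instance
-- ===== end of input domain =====

-- B replaces A's single running-min-with-reset pass by a simpler two-pass compute-min-then-filter structure.


-- ===== PORT A =====
-- literal port of A: one fold carrying (nodes, shallowest), with append / reset / skip branches
def get_shallowest (roots : List (String × Int)) : List String × Int :=
  let st := roots.foldl (fun (st : List String × Int) p =>
    if p.2 = st.2 then (st.1 ++ [p.1], st.2)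
    else if p.2 < st.2 then ([p.1], p.2)
    else st) ([], 0)
  (st.1, st.2)

-- ===== PORT B =====
-- port of B: min over 0 :: depths (Python min([0] + depths) left-folds), then a comprehension filtering for that minimum
def get_shallowest_alt (roots : List (String × Int)) : List String × Int :=
  let shallowest := (roots.map Prod.snd).foldl min 0
  let nodes := roots.foldl (fun acc p => if p.2 = shallowest then acc ++ [p.1] else acc) []
  (nodes, shallowest)

-- ===== PRECONDITION & SPEC =====
def Spec_get_shallowest (roots : List (String × Int)) (out : List String × Int) : Prop := out = get_shallowest_alt roots
instance (roots : List (String × Int)) (out : List String × Int) : Decidable (Spec_get_shallowest roots out) := by unfold Spec_get_shallowest; infer_instance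

-- ===== CLAIM (what is proved, stated in full; the proofs are below) =====
def Claim_equal_get_shallowest : Prop := ∀ (roots : List (String × Int)), Dom_get_shallowest roots → Spec_get_shallowest roots (get_shallowest roots)

-- ===== LEMMAS AND PROOFS =====

-- B's comprehension fold is filter-then-map
theorem altNodes_eq_filter (roots : List (String × Int)) (s : Int) (acc : List String) :
    roots.foldl (fun acc p => if p.2 = s then acc ++ [p.1] else acc) acc
      = acc ++ (roots.filter (fun p => p.2 = s)).map Prod.fst := by
  induction roots generalizing acc with
  | nil => simp
  | cons h t ih =>
    simp only [List.foldl_cons, List.filter_cons]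
    by_cases hd : h.2 = s <;> simp [hd, ih]

-- the running fold's minimum is monotone below its seed
theorem fmin_le (l : List Int) (s : Int) : l.foldl min s ≤ s := by
  induction l generalizing s with
  | nil => simp
  | cons h t ih => exact le_trans (ih _) (min_le_left _ _)

-- characterisation of A's loop: result = (survivors of ns, filtered tail) at the running minimum
theorem loopA_char (roots : List (String × Int)) (ns : List String) (s : Int) :
    roots.foldl (fun (st : List String × Int) p =>
      if p.2 = st.2 then (st.1 ++ [p.1], st.2)
      else if p.2 < st.2 then ([p.1], p.2)
      else st) (ns, s)
    = (let m := (roots.map Prod.snd).foldl min s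
       ((if m < s then [] else ns) ++ (roots.filter (fun p => p.2 = m)).map Prod.fst, m)) := by
  induction roots generalizing ns s with
  | nil => simp
  | cons h t ih =>
    simp only [List.foldl_cons, List.map_cons, List.filter_cons]
    by_cases h1 : h.2 = s
    · rw [if_pos h1, ih]
      have hm : min s h.2 = s := by omega
      have hle := fmin_le (t.map Prod.snd) (min s h.2)
      simp only [hm] at hle ⊢
      by_cases h2 : (t.map Prod.snd).foldl min s < s
      · have : ¬ (h.2 = (t.map Prod.snd).foldl min s) := by omega
        simp [h2, this]
      · have : h.2 = (t.map Prod.snd).foldl min s := by omega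
        simp [h2, this]
    · rw [if_neg h1]
      by_cases h2 : h.2 < s
      · rw [if_pos h2, ih]
        have hm : min s h.2 = h.2 := by omega
        have hle := fmin_le (t.map Prod.snd) (min s h.2)
        simp only [hm] at hle ⊢
        have hms : (t.map Prod.snd).foldl min h.2 < s := by omega
        by_cases h3 : (t.map Prod.snd).foldl min h.2 < h.2
        · have : ¬ (h.2 = (t.map Prod.snd).foldl min h.2) := by omega
          simp [hms, h3, this]
        · have : h.2 = (t.map Prod.snd).foldl min h.2 := by omega
          simp [← this, h2]
      · rw [if_neg h2, ih]
        have hm : min s h.2 = s := by omega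
        have hle := fmin_le (t.map Prod.snd) (min s h.2)
        simp only [hm] at hle ⊢
        have : ¬ (h.2 = (t.map Prod.snd).foldl min s) := by omega
        simp [this]

-- ===== VERDICT (by name: the statement is the Claim_ definition above) =====
theorem get_shallowest_spec : Claim_equal_get_shallowest := by
  intro roots _
  unfold Spec_get_shallowest get_shallowest get_shallowest_alt
  simp only [loopA_char, altNodes_eq_filter]
  split <;> simp
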